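-- pv_equiv track=rewrite | github.com/marinadabrytskaya/brand-mirror | scripts/render_brand_report_pdf.py | title_card_lines
-- ===== SOURCE A (Python) =====
-- def norm(value):
--     if value is None:
--         return ""
--     return " ".join(str(value).split()).strip()
--
-- def title_card_lines(text):
--     words = [word for word in norm(text).upper().split(" ") if word]
--     if not words:
--         return []
--     if len(words) == 1:
--         return [" ".join(list(words[0]))]
--     if len(words) == 2 and max(len(words[0]), len(words[1])) <= 12:
--         return [" ".join(list(words[0])), " ".join(list(words[1]))]
--     if len(words) == 3 and words[0] in {"THE", "A"}:
--         return [" ".join(list(words[0])), " ".join(list(words[1])), " ".join(list(words[2]))]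
--     if len(words) == 3:
--         return [" ".join(list(" ".join(words[:2]))), " ".join(list(words[2]))]
--     return ["   ".join(" ".join(list(word)) for word in words)]
-- ===== SOURCE B (Python) =====
-- def _break_before(words, i):
--     n = len(words)
--     if n == 2:
--         return len(words[0]) <= 12 and len(words[1]) <= 12
--     if n == 3:
--         return i == 2 or words[0].upper() in ("THE", "A")
--     return False
--
-- def title_card_lines(text):
--     words = ("" if text is None else str(text)).split()
--     lines = []
--     for i, w in enumerate(words):
--         spaced = " ".join(w.upper())
--         if i == 0 or _break_before(words, i):
--             lines.append(spaced)
--         else: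
--             lines[-1] += "   " + spaced
--     return lines
-- ===== Notes on version B (the rewrite author's own statement) =====
-- stated objective: alternative
-- what changed: B replaces A's five-way branch chain of hand-written return literals (and its normalize-join-strip-resplit pipeline) with a single streaming pass: split once into words, then one loop with a lines accumulator that either starts a new line or appends the triple-space separator plus the letter-spaced word to the last line, line breaks decided by a local per-gap predicate.
import Mathlib
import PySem

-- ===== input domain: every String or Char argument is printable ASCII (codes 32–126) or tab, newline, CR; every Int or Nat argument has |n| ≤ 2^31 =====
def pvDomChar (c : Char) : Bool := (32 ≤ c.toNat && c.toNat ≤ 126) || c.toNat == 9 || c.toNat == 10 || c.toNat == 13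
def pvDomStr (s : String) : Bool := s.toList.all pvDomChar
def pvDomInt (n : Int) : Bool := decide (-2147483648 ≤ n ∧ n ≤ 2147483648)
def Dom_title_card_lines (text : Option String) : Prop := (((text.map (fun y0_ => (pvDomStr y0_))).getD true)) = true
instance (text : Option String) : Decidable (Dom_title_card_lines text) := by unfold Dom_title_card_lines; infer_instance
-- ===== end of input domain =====

-- B replaces A's five-way branch chain of return literals with a single streaming pass over the
-- words: a lines accumulator that starts a new line or extends the last one, breaks decided by a
-- local per-gap predicate (objective: alternative).

-- ===== PORT A =====
-- " ".join(list(w)) — letter-spacing, exact on the List Char side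
def pvLetterSpaced (w : String) : String :=
  String.ofList (PySem.Chars.join [' '] (w.toList.map (fun c => [c])))

-- norm(value): "" for None, else " ".join(str(value).split()).strip()
def pvNorm (value : Option String) : String :=
  match value with
  | none => ""
  | some s => PySem.Str.strip (PySem.Str.join " " (PySem.Str.split₀ s))

-- the branch chain of title_card_lines, applied to the computed word list
def pvABody (words : List String) : List String :=
  if words = [] then []
  else if PySem.List.len words = 1 then
    [pvLetterSpaced (PySem.List.pyGetD words 0 "")]
  else if PySem.List.len words = 2 ∧
      max (PySem.Str.len (PySem.List.pyGetD words 0 "")) (PySem.Str.len (PySem.List.pyGetD words 1 "")) ≤ 12 then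
    [pvLetterSpaced (PySem.List.pyGetD words 0 ""), pvLetterSpaced (PySem.List.pyGetD words 1 "")]
  else if PySem.List.len words = 3 ∧ PySem.List.pyGetD words 0 "" ∈ PySem.Set.ofList ["THE", "A"] then
    [pvLetterSpaced (PySem.List.pyGetD words 0 ""), pvLetterSpaced (PySem.List.pyGetD words 1 ""),
     pvLetterSpaced (PySem.List.pyGetD words 2 "")]
  else if PySem.List.len words = 3 then
    [pvLetterSpaced (PySem.Str.join " " (PySem.List.slice words none (some 2))),
     pvLetterSpaced (PySem.List.pyGetD words 2 "")]
  else
    [PySem.Str.join "   " (words.map pvLetterSpaced)]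

def title_card_lines (text : Option String) : List String :=
  -- words = [word for word in norm(text).upper().split(" ") if word]; split(" ") never raises (sep ≠ "")
  pvABody (((PySem.Str.split? (PySem.Str.upper (pvNorm text)) " ").getD []).filter (fun w => !(w == "")))

-- ===== PORT B =====
-- _break_before(words, i): should a new line start before word i?
def pvBreakBefore (words : List String) (i : Nat) : Bool :=
  if PySem.List.len words = 2 then
    decide (PySem.Str.len (PySem.List.pyGetD words 0 "") ≤ 12) &&
    decide (PySem.Str.len (PySem.List.pyGetD words 1 "") ≤ 12)
  else if PySem.List.len words = 3 then
    (i == 2) || (PySem.Str.upper (PySem.List.pyGetD words 0 "") == "THE") ||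
      (PySem.Str.upper (PySem.List.pyGetD words 0 "") == "A")
  else false

-- lines[-1] += x  (the loop guarantees lines is nonempty when this is used)
def pvAppendLast (x : String) : List String → List String
  | [] => []
  | [l] => [l ++ x]
  | l :: r => l :: pvAppendLast x r

-- the for-loop over enumerate(words) with the lines accumulator
def pvBGo (words : List String) : List String → Nat → List String → List String
  | [], _, lines => lines
  | w :: rest, i, lines =>
      pvBGo words rest (i + 1)
        (if i == 0 || pvBreakBefore words i then lines ++ [pvLetterSpaced (PySem.Str.upper w)]
         else pvAppendLast ("   " ++ pvLetterSpaced (PySem.Str.upper w)) lines)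

def title_card_lines_alt (text : Option String) : List String :=
  let words := PySem.Str.split₀ (text.getD "")
  pvBGo words words 0 []

-- ===== PRECONDITION & SPEC =====
def Spec_title_card_lines (text : Option String) (out : List String) : Prop := out = title_card_lines_alt text
instance (text : Option String) (out : List String) : Decidable (Spec_title_card_lines text out) := by unfold Spec_title_card_lines; infer_instance

-- ===== CLAIM (what is proved, stated in full; the proofs are below) =====
def Claim_equal_title_card_lines : Prop := ∀ (text : Option String), Dom_title_card_lines text → Spec_title_card_lines text (title_card_lines text)

-- ===== LEMMAS AND PROOFS =====

-- token shape produced by str.split(): nonempty, whitespace-free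
def pvNice (ts : List (List Char)) : Prop :=
  ∀ t ∈ ts, t ≠ [] ∧ ∀ c ∈ t, PySem.Chars.isspace c = false

lemma pv_split0_go_nice : ∀ (s cur : List Char) (acc : List (List Char)),
    (∀ c ∈ cur, PySem.Chars.isspace c = false) →
    pvNice acc →
    pvNice (PySem.Chars.split₀.go s cur acc) := by
  intro s
  induction s with
  | nil =>
    intro cur acc hcur hacc t ht
    unfold PySem.Chars.split₀.go at ht
    by_cases hc : cur = []
    · subst hc; simp at ht; exact hacc t ht
    · simp [List.isEmpty_iff, hc] at ht
      rcases ht with h | h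
      · exact hacc t h
      · subst h
        refine ⟨by simpa using hc, ?_⟩
        intro c hcmem; exact hcur c (by simpa using hcmem)
  | cons c rest ih =>
    intro cur acc hcur hacc
    unfold PySem.Chars.split₀.go
    by_cases hs : PySem.Chars.isspace c = true
    · by_cases hc : cur = []
      · subst hc; simp [hs]
        exact ih [] acc (by simp) hacc
      · simp [hs, List.isEmpty_iff, hc]
        refine ih [] _ (by simp) ?_
        intro t ht
        rcases List.mem_cons.mp ht with h | h
        · subst h
          exact ⟨by simpa using hc, fun x hx => hcur x (by simpa using hx)⟩
        · exact hacc t h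
    · simp [hs]
      refine ih (c :: cur) acc ?_ hacc
      intro x hx
      rcases List.mem_cons.mp hx with h | h
      · subst h; simpa using hs
      · exact hcur x h

lemma pv_split0_nice (l : List Char) : pvNice (PySem.Chars.split₀ l) := by
  unfold PySem.Chars.split₀
  exact pv_split0_go_nice l [] [] (by simp) (by intro t ht; simp at ht)

lemma pv_join_append_singleton : ∀ (A : List (List Char)) (b : List Char), A ≠ [] →
    PySem.Chars.join [' '] (A ++ [b]) = PySem.Chars.join [' '] A ++ ' ' :: b := by
  intro A
  induction A with
  | nil => intro b h; exact absurd rfl h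
  | cons t rest ih =>
    intro b _
    cases rest with
    | nil => simp [PySem.Chars.join_cons_cons, PySem.Chars.join_singleton]
    | cons q r =>
      have h2 := ih b (by simp)
      simp only [List.cons_append] at h2
      simp only [List.cons_append, PySem.Chars.join_cons_cons]
      rw [h2]
      simp

lemma pv_join_reverse : ∀ (ts : List (List Char)),
    (PySem.Chars.join [' '] ts).reverse = PySem.Chars.join [' '] (ts.reverse.map List.reverse) := by
  intro ts
  induction ts with
  | nil => simp [PySem.Chars.join_nil]
  | cons t rest ih =>
    cases rest with
    | nil => simp [PySem.Chars.join_singleton]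
    | cons q r =>
      rw [PySem.Chars.join_cons_cons, List.reverse_append, List.reverse_append, ih]
      have hne : ((q :: r).reverse.map List.reverse) ≠ [] := by simp
      rw [show ((t :: q :: r).reverse.map List.reverse)
            = ((q :: r).reverse.map List.reverse) ++ [t.reverse] by simp]
      rw [pv_join_append_singleton _ _ hne]
      simp

lemma pv_lstrip_join (ts : List (List Char)) (h : pvNice ts) :
    PySem.Chars.lstrip (PySem.Chars.join [' '] ts) = PySem.Chars.join [' '] ts := by
  cases ts with
  | nil => simp [PySem.Chars.lstrip, PySem.Chars.join_nil]
  | cons t rest =>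
    obtain ⟨hne, hchars⟩ := h t (by simp)
    obtain ⟨c, t', rfl⟩ : ∃ c t', t = c :: t' := by
      cases t with
      | nil => exact absurd rfl hne
      | cons c t' => exact ⟨c, t', rfl⟩
    have hc : PySem.Chars.isspace c = false := hchars c (by simp)
    cases rest with
    | nil =>
      simp [PySem.Chars.join_singleton, PySem.Chars.lstrip, hc]
    | cons q r =>
      rw [PySem.Chars.join_cons_cons]
      simp [PySem.Chars.lstrip, hc]

lemma pv_nice_reverse (ts : List (List Char)) (h : pvNice ts) :
    pvNice (ts.reverse.map List.reverse) := by
  intro t ht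
  simp only [List.mem_map, List.mem_reverse] at ht
  obtain ⟨u, hu, rfl⟩ := ht
  obtain ⟨hne, hchars⟩ := h u hu
  exact ⟨by simpa using hne, fun c hc => hchars c (by simpa using hc)⟩

lemma pv_strip_join (ts : List (List Char)) (h : pvNice ts) :
    PySem.Chars.strip (PySem.Chars.join [' '] ts) = PySem.Chars.join [' '] ts := by
  unfold PySem.Chars.strip PySem.Chars.rstrip
  rw [pv_lstrip_join ts h, pv_join_reverse]
  rw [show List.dropWhile PySem.Chars.isspace (PySem.Chars.join [' '] (ts.reverse.map List.reverse))
        = PySem.Chars.lstrip (PySem.Chars.join [' '] (ts.reverse.map List.reverse)) from rfl]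
  rw [pv_lstrip_join _ (pv_nice_reverse ts h), ← pv_join_reverse]
  simp

lemma pv_upper_join : ∀ (ts : List (List Char)),
    PySem.Chars.upper (PySem.Chars.join [' '] ts) = PySem.Chars.join [' '] (ts.map PySem.Chars.upper) := by
  intro ts
  have hsp : PySem.Chars.upperChar ' ' = ' ' := by decide
  induction ts with
  | nil => simp [PySem.Chars.upper, PySem.Chars.join_nil]
  | cons t rest ih =>
    cases rest with
    | nil => simp [PySem.Chars.join_singleton]
    | cons q r =>
      calc PySem.Chars.upper (PySem.Chars.join [' '] (t :: q :: r))
          = PySem.Chars.upper t ++ [' '] ++ PySem.Chars.upper (PySem.Chars.join [' '] (q :: r)) := by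
            rw [PySem.Chars.join_cons_cons]
            simp [PySem.Chars.upper, hsp]
        _ = PySem.Chars.upper t ++ [' '] ++ PySem.Chars.join [' '] ((q :: r).map PySem.Chars.upper) := by
            rw [ih]
        _ = PySem.Chars.join [' '] ((t :: q :: r).map PySem.Chars.upper) := by
            simp only [List.map_cons]
            rw [PySem.Chars.join_cons_cons]

lemma pv_upperChar_not_space (c : Char) (h : PySem.Chars.isspace c = false) :
    PySem.Chars.isspace (PySem.Chars.upperChar c) = false := by
  unfold PySem.Chars.upperChar
  split
  · rename_i hl
    have hb : 'a' ≤ c ∧ c ≤ 'z' := by simpa [PySem.Chars.islower] using hl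
    have h97 : 97 ≤ c.toNat ∧ c.toNat ≤ 122 := by
      obtain ⟨h1, h2⟩ := hb
      exact ⟨h1, h2⟩
    have hval : (c.toNat - 32).isValidChar := by
      unfold Nat.isValidChar
      left; omega
    simp only [PySem.Chars.isspace, Char.toNat_ofNat, hval, if_pos]
    simp
    omega
  · exact h

lemma pv_splitOn_go_eq (c : Char) : ∀ (l : List Char) (fuel : ℕ) (cur : List Char) (acc : List (List Char)),
    l.length < fuel →
    PySem.Chars.splitOn.go [c] fuel l cur acc
      = acc.reverse ++ (List.splitOn c l).modifyHead (fun x => cur.reverse ++ x) := by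
  intro l
  induction l with
  | nil =>
    intro fuel cur acc hf
    match fuel with
    | 0 => omega
    | fuel + 1 =>
      show (cur.reverse :: acc).reverse = _
      simp [List.splitOn, List.splitOnP_nil]
  | cons a rest ih =>
    intro fuel cur acc hf
    match fuel with
    | 0 => omega
    | fuel + 1 =>
      show (if List.isPrefixOf [c] (a :: rest)
              then PySem.Chars.splitOn.go [c] fuel (List.drop 1 (a :: rest)) [] (cur.reverse :: acc)
              else PySem.Chars.splitOn.go [c] fuel rest (a :: cur) acc) = _
      by_cases hca : c = a
      · subst hca
        rw [if_pos (by simp [List.isPrefixOf])]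
        rw [show List.drop 1 (c :: rest) = rest from rfl]
        rw [ih fuel [] (cur.reverse :: acc) (by simpa using Nat.lt_of_succ_lt_succ hf)]
        simp [List.splitOn, List.splitOnP_cons]
        exact congrFun List.modifyHead_id _
      · rw [if_neg (by simp [List.isPrefixOf]; exact fun h => hca h)]
        rw [ih fuel (a :: cur) acc (by simpa using Nat.lt_of_succ_lt_succ hf)]
        simp only [List.splitOn, List.splitOnP_cons]
        rw [if_neg (by simp; exact fun h => hca h.symm)]
        rw [List.modifyHead_modifyHead]
        have hfe : ((fun x => cur.reverse ++ x) ∘ List.cons a) = (fun x => (a :: cur).reverse ++ x) := by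
          funext x; simp
        rw [hfe]

lemma pv_splitOn_eq (s : List Char) (c : Char) :
    PySem.Chars.splitOn s [c] = List.splitOn c s := by
  unfold PySem.Chars.splitOn
  rw [pv_splitOn_go_eq c s (s.length + 1) [] [] (by omega)]
  simp only [List.reverse_nil, List.nil_append]
  exact congrFun List.modifyHead_id _

lemma pv_CL (ts : List (List Char)) (h : pvNice ts) :
    PySem.Chars.splitOn (PySem.Chars.upper (PySem.Chars.strip (PySem.Chars.join [' '] ts))) [' ']
      = if ts = [] then [[]] else ts.map PySem.Chars.upper := by
  rw [pv_strip_join ts h, pv_upper_join, pv_splitOn_eq]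
  by_cases hts : ts = []
  · subst hts
    simp [PySem.Chars.join_nil, List.splitOn, List.splitOnP_nil]
  · rw [if_neg hts]
    have hmem : ∀ l ∈ ts.map PySem.Chars.upper, ' ' ∉ l := by
      intro l hl
      simp only [List.mem_map] at hl
      obtain ⟨t, ht, rfl⟩ := hl
      intro hsp
      simp only [PySem.Chars.upper, List.mem_map] at hsp
      obtain ⟨x, hx, hxeq⟩ := hsp
      have hns := pv_upperChar_not_space x ((h t ht).2 x hx)
      rw [hxeq] at hns
      exact absurd hns (by decide)
    exact List.splitOn_intercalate _ ' ' hmem (by simpa using hts)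

lemma pv_words_eq (s : String) :
    ((PySem.Str.split? (PySem.Str.upper (pvNorm (some s))) " ").getD []).filter (fun w => !(w == ""))
      = (PySem.Str.split₀ s).map PySem.Str.upper := by
  have hts := pv_split0_nice s.toList
  have hsep : (" " : String).toList = [' '] := by decide
  have hXl : (PySem.Str.upper (pvNorm (some s))).toList
      = PySem.Chars.upper (PySem.Chars.strip (PySem.Chars.join [' '] (PySem.Chars.split₀ s.toList))) := by
    simp [pvNorm, PySem.Str.toList_upper, PySem.Str.toList_strip, PySem.Str.toList_join,
          PySem.Str.split₀_map_toList, hsep]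
  have hsplit := PySem.Str.split?_map (PySem.Str.upper (pvNorm (some s))) " "
  rw [hsep, hXl] at hsplit
  rw [show PySem.Chars.split? (PySem.Chars.upper (PySem.Chars.strip (PySem.Chars.join [' ']
        (PySem.Chars.split₀ s.toList)))) [' ']
      = some (PySem.Chars.splitOn (PySem.Chars.upper (PySem.Chars.strip (PySem.Chars.join [' ']
        (PySem.Chars.split₀ s.toList)))) [' ']) from by simp [PySem.Chars.split?]] at hsplit
  rw [pv_CL _ hts] at hsplit
  cases hopt : PySem.Str.split? (PySem.Str.upper (pvNorm (some s))) " " with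
  | none => rw [hopt] at hsplit; simp at hsplit
  | some l =>
    rw [hopt] at hsplit
    simp only [Option.map_some, Option.some.injEq] at hsplit
    simp only [Option.getD_some]
    by_cases h0 : PySem.Chars.split₀ s.toList = []
    · rw [if_pos h0] at hsplit
      have hl : l = [""] := by
        cases l with
        | nil => simp at hsplit
        | cons x xs =>
          cases xs with
          | nil =>
            simp only [List.map_cons, List.map_nil, List.cons.injEq, and_true] at hsplit
            rw [show x = "" from String.toList_inj.mp (by simp [hsplit])]
          | cons y ys => simp at hsplit
      subst hl
      have hr : PySem.Str.split₀ s = [] := by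
        have := PySem.Str.split₀_map_toList s
        rw [h0] at this
        exact List.map_eq_nil_iff.mp this
      simp [hr, List.filter]
    · rw [if_neg h0] at hsplit
      have hl : l = (PySem.Str.split₀ s).map PySem.Str.upper := by
        apply List.map_injective_iff.mpr (fun a b hab => String.toList_inj.mp hab)
        rw [hsplit, List.map_map]
        have : (String.toList ∘ PySem.Str.upper) = (PySem.Chars.upper ∘ String.toList) := by
          funext w; simp [PySem.Str.toList_upper]
        rw [this, ← List.map_map, PySem.Str.split₀_map_toList]
      subst hl
      apply List.filter_eq_self.mpr
      intro w hw
      simp only [List.mem_map] at hw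
      obtain ⟨v, hv, rfl⟩ := hw
      have hvl : v.toList ∈ PySem.Chars.split₀ s.toList := by
        rw [← PySem.Str.split₀_map_toList]
        exact List.mem_map_of_mem hv
      have hvne := (hts _ hvl).1
      have hne : (PySem.Str.upper v).toList ≠ [] := by
        rw [PySem.Str.toList_upper]
        simp [PySem.Chars.upper, hvne]
      have hne' : PySem.Str.upper v ≠ "" := fun he => hne (by rw [he]; rfl)
      simp [hne']

-- letter-spacing identities at the String level
lemma pv_join_single (sep x : String) : PySem.Str.join sep [x] = x := by
  rw [← String.toList_inj, PySem.Str.toList_join]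
  simp [PySem.Chars.join_singleton]

lemma pv_str_join_cons (x y : String) (l : List String) :
    PySem.Str.join "   " (x :: y :: l) = x ++ "   " ++ PySem.Str.join "   " (y :: l) := by
  rw [← String.toList_inj]
  simp [PySem.Str.toList_join, PySem.Chars.join_cons_cons]

lemma pv_spaced_merge_chars : ∀ (x y : List Char), x ≠ [] → y ≠ [] →
    PySem.Chars.join [' '] ((x ++ ' ' :: y).map (fun c => [c]))
      = PySem.Chars.join [' '] (x.map (fun c => [c])) ++ ' ' :: ' ' :: ' ' ::
        PySem.Chars.join [' '] (y.map (fun c => [c])) := by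
  intro x
  induction x with
  | nil => intro y h; exact absurd rfl h
  | cons c x' ih =>
    intro y _ hy
    cases x' with
    | nil =>
      obtain ⟨d, y', rfl⟩ : ∃ d y', y = d :: y' := by
        cases y with
        | nil => exact absurd rfl hy
        | cons d y' => exact ⟨d, y', rfl⟩
      simp [PySem.Chars.join_cons_cons]
    | cons e x'' =>
      have h2 := ih y (by simp) hy
      simp only [List.cons_append, List.map_cons] at h2 ⊢
      rw [PySem.Chars.join_cons_cons, PySem.Chars.join_cons_cons, h2]
      simp

lemma pv_spaced_merge (a b : String) (ha : a.toList ≠ []) (hb : b.toList ≠ []) :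
    pvLetterSpaced (PySem.Str.join " " [a, b])
      = pvLetterSpaced a ++ "   " ++ pvLetterSpaced b := by
  have h1 : (" " : String).toList = [' '] := by decide
  have h3 : ("   " : String).toList = [' ', ' ', ' '] := by decide
  have hOf : ∀ (l : List Char), (String.ofList l).toList = l := by intro l; simp
  rw [← String.toList_inj]
  simp only [pvLetterSpaced, String.toList_append, h3, hOf]
  rw [show (PySem.Str.join " " [a, b]).toList = a.toList ++ ' ' :: b.toList from by
    simp [PySem.Str.toList_join, h1, PySem.Chars.join_cons_cons, PySem.Chars.join_singleton]]
  rw [pv_spaced_merge_chars a.toList b.toList ha hb]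
  simp

-- String append facts (Lean's String.append is proved about via toList)
lemma pv_sappend_assoc (x y z : String) : (x ++ y) ++ z = x ++ (y ++ z) := by
  rw [← String.toList_inj]; simp

lemma pv_sappend_empty (x : String) : x ++ "" = x := by
  rw [← String.toList_inj]; simp

-- length helper for the B side
lemma pv_len_upper (w : String) : PySem.Str.len (PySem.Str.upper w) = PySem.Str.len w := by
  simp [PySem.Str.len_eq, PySem.Str.toList_upper, PySem.Chars.upper]

lemma pvAppendLast_append : ∀ (acc : List String) (x y : String),
    pvAppendLast y (acc ++ [x]) = acc ++ [x ++ y] := by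
  intro acc
  induction acc with
  | nil => intro x y; rfl
  | cons a r ih =>
    intro x y
    cases r with
    | nil => simp [pvAppendLast]
    | cons b t =>
      have h2 := ih x y
      simp only [List.cons_append] at h2 ⊢
      rw [show pvAppendLast y (a :: b :: (t ++ [x])) = a :: pvAppendLast y (b :: (t ++ [x])) from rfl,
          h2]

-- the concatenated tail a no-break run appends to the first line
def pvTailU (l : List String) : String :=
  l.foldr (fun w a => ("   " ++ pvLetterSpaced (PySem.Str.upper w)) ++ a) ""

lemma pv_join_tail : ∀ (l : List String) (x : String),
    PySem.Str.join "   " (x :: l.map (fun w => pvLetterSpaced (PySem.Str.upper w))) = x ++ pvTailU l := by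
  intro l
  induction l with
  | nil =>
    intro x
    rw [show pvTailU [] = "" from rfl, pv_sappend_empty]
    exact pv_join_single _ _
  | cons w r ih =>
    intro x
    simp only [List.map_cons]
    rw [pv_str_join_cons, ih]
    rw [show pvTailU (w :: r) = ("   " ++ pvLetterSpaced (PySem.Str.upper w)) ++ pvTailU r from rfl]
    simp [pv_sappend_assoc]

-- in the no-break regime the loop folds every remaining word onto the last line
lemma pvBGo_nobreak (words : List String) (hw : ∀ i, pvBreakBefore words i = false) :
    ∀ (rest : List String) (i : Nat) (acc : List String) (x : String), 1 ≤ i →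
      pvBGo words rest i (acc ++ [x]) = acc ++ [x ++ pvTailU rest] := by
  intro rest
  induction rest with
  | nil =>
    intro i acc x _
    rw [show pvBGo words [] i (acc ++ [x]) = acc ++ [x] from rfl]
    rw [show pvTailU [] = "" from rfl, pv_sappend_empty]
  | cons w r ih =>
    intro i acc x hi
    have hne : (i == 0) = false := by simp; omega
    rw [show pvBGo words (w :: r) i (acc ++ [x])
          = pvBGo words r (i + 1)
              (if i == 0 || pvBreakBefore words i then (acc ++ [x]) ++ [pvLetterSpaced (PySem.Str.upper w)]
               else pvAppendLast ("   " ++ pvLetterSpaced (PySem.Str.upper w)) (acc ++ [x])) from rfl]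
    rw [hne, hw i]
    rw [show ((false || false : Bool)) = false from rfl, if_neg (by decide : ¬ ((false : Bool) = true))]
    rw [pvAppendLast_append, ih (i + 1) acc _ (by omega)]
    rw [show pvTailU (w :: r) = ("   " ++ pvLetterSpaced (PySem.Str.upper w)) ++ pvTailU r from rfl]
    simp [pv_sappend_assoc]

-- core: A's branch chain equals B's streaming loop, on the uppered word list
lemma pv_body_eq : ∀ (ws : List String), (∀ w ∈ ws, w.toList ≠ []) →
    pvABody (ws.map PySem.Str.upper) = pvBGo ws ws 0 [] := by
  intro ws h
  match ws with
  | [] => rfl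
  | [a] =>
    simp [pvABody, pvBGo, pvBreakBefore, PySem.List.len, PySem.List.pyGetD, PySem.List.pyGet?,
          PySem.List.pyIdx?]
  | [a, b] =>
    have hbool : pvBreakBefore [a, b] 1
        = decide (max (PySem.Str.len (PySem.Str.upper a)) (PySem.Str.len (PySem.Str.upper b)) ≤ 12) := by
      rw [pv_len_upper, pv_len_upper]
      simp [pvBreakBefore, PySem.List.len, PySem.List.pyGetD, PySem.List.pyGet?, PySem.List.pyIdx?]
    rw [show pvBGo [a, b] [a, b] 0 []
          = pvBGo [a, b] [b] 1 [pvLetterSpaced (PySem.Str.upper a)] from rfl]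
    rw [show pvBGo [a, b] [b] 1 [pvLetterSpaced (PySem.Str.upper a)]
          = pvBGo [a, b] [] 2
              (if pvBreakBefore [a, b] 1
                then [pvLetterSpaced (PySem.Str.upper a)] ++ [pvLetterSpaced (PySem.Str.upper b)]
                else pvAppendLast ("   " ++ pvLetterSpaced (PySem.Str.upper b))
                  [pvLetterSpaced (PySem.Str.upper a)]) from rfl]
    have hai : PySem.Str.len (PySem.Str.upper a) = ((PySem.Chars.upper a.toList).length : Int) := by
      simp [PySem.Str.len_eq, PySem.Str.toList_upper]
    have hbi : PySem.Str.len (PySem.Str.upper b) = ((PySem.Chars.upper b.toList).length : Int) := by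
      simp [PySem.Str.len_eq, PySem.Str.toList_upper]
    rw [hbool]
    by_cases hm : max (PySem.Str.len (PySem.Str.upper a)) (PySem.Str.len (PySem.Str.upper b)) ≤ 12
    · have haN : (PySem.Chars.upper a.toList).length ≤ 12 := by
        have h1 := le_trans (le_max_left _ _) hm
        rw [hai] at h1
        exact_mod_cast h1
      have hbN : (PySem.Chars.upper b.toList).length ≤ 12 := by
        have h1 := le_trans (le_max_right _ _) hm
        rw [hbi] at h1
        exact_mod_cast h1
      rw [if_pos (by simp [haN, hbN])]
      rw [show pvBGo [a, b] [] 2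
            ([pvLetterSpaced (PySem.Str.upper a)] ++ [pvLetterSpaced (PySem.Str.upper b)])
          = [pvLetterSpaced (PySem.Str.upper a), pvLetterSpaced (PySem.Str.upper b)] from rfl]
      simp only [pvABody, List.map_cons, List.map_nil]
      rw [if_neg (by simp), if_neg (by intro hc; simp [PySem.List.len] at hc),
          if_pos (⟨by simp [PySem.List.len], by
            simpa [PySem.List.pyGetD, PySem.List.pyGet?, PySem.List.pyIdx?] using hm⟩)]
      simp [PySem.List.pyGetD, PySem.List.pyGet?, PySem.List.pyIdx?]
    · have hN : ¬ ((PySem.Chars.upper a.toList).length ≤ 12 ∧ (PySem.Chars.upper b.toList).length ≤ 12) := by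
        intro hc
        apply hm
        rw [max_le_iff, hai, hbi]
        exact ⟨by exact_mod_cast hc.1, by exact_mod_cast hc.2⟩
      rw [if_neg (by simp; omega)]
      rw [show pvAppendLast ("   " ++ pvLetterSpaced (PySem.Str.upper b)) [pvLetterSpaced (PySem.Str.upper a)]
            = [pvLetterSpaced (PySem.Str.upper a) ++ ("   " ++ pvLetterSpaced (PySem.Str.upper b))] from rfl]
      rw [show pvBGo [a, b] [] 2
            [pvLetterSpaced (PySem.Str.upper a) ++ ("   " ++ pvLetterSpaced (PySem.Str.upper b))]
          = [pvLetterSpaced (PySem.Str.upper a) ++ ("   " ++ pvLetterSpaced (PySem.Str.upper b))] from rfl]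
      simp only [pvABody, List.map_cons, List.map_nil]
      rw [if_neg (by simp), if_neg (by intro hc; simp [PySem.List.len] at hc),
          if_neg (by
            intro hc
            exact hm (by
              simpa [PySem.List.pyGetD, PySem.List.pyGet?, PySem.List.pyIdx?] using hc.2)),
          if_neg (by
            intro hc
            have := hc.1
            simp [PySem.List.len] at this),
          if_neg (by intro hc; simp [PySem.List.len] at hc)]
      rw [pv_str_join_cons, pv_join_single]
      simp [pv_sappend_assoc]
  | [a, b, c] =>
    have hiff : (PySem.Str.upper a ∈ PySem.Set.ofList ["THE", "A"])
        ↔ (PySem.Str.upper a = "THE" ∨ PySem.Str.upper a = "A") := by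
      rw [PySem.Set.mem_ofList]
      simp
    have hbool : pvBreakBefore [a, b, c] 1
        = decide (PySem.Str.upper a ∈ PySem.Set.ofList ["THE", "A"]) := by
      simp only [pvBreakBefore, PySem.List.len, PySem.List.pyGetD, PySem.List.pyGet?,
            PySem.List.pyIdx?]
      norm_num [hiff]
      by_cases h1 : PySem.Str.upper a = "THE" <;> by_cases h2 : PySem.Str.upper a = "A" <;>
        simp [h1, h2]
    have hbrk2 : pvBreakBefore [a, b, c] 2 = true := by
      simp [pvBreakBefore, PySem.List.len]
    rw [show pvBGo [a, b, c] [a, b, c] 0 []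
          = pvBGo [a, b, c] [b, c] 1 [pvLetterSpaced (PySem.Str.upper a)] from rfl]
    rw [show pvBGo [a, b, c] [b, c] 1 [pvLetterSpaced (PySem.Str.upper a)]
          = pvBGo [a, b, c] [c] 2
              (if pvBreakBefore [a, b, c] 1
                then [pvLetterSpaced (PySem.Str.upper a)] ++ [pvLetterSpaced (PySem.Str.upper b)]
                else pvAppendLast ("   " ++ pvLetterSpaced (PySem.Str.upper b))
                  [pvLetterSpaced (PySem.Str.upper a)]) from rfl]
    rw [hbool]
    by_cases hm : PySem.Str.upper a ∈ PySem.Set.ofList ["THE", "A"]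
    · rw [if_pos (by simp [hm])]
      rw [show pvBGo [a, b, c] [c] 2
            ([pvLetterSpaced (PySem.Str.upper a)] ++ [pvLetterSpaced (PySem.Str.upper b)])
          = pvBGo [a, b, c] [] 3
              (if (2 == 0) || pvBreakBefore [a, b, c] 2
                then ([pvLetterSpaced (PySem.Str.upper a)] ++ [pvLetterSpaced (PySem.Str.upper b)])
                  ++ [pvLetterSpaced (PySem.Str.upper c)]
                else pvAppendLast ("   " ++ pvLetterSpaced (PySem.Str.upper c))
                  ([pvLetterSpaced (PySem.Str.upper a)] ++ [pvLetterSpaced (PySem.Str.upper b)])) from rfl]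
      rw [hbrk2]
      rw [show ((2 == 0 : Bool) || true) = true from rfl, if_pos rfl]
      rw [show pvBGo [a, b, c] [] 3
            (([pvLetterSpaced (PySem.Str.upper a)] ++ [pvLetterSpaced (PySem.Str.upper b)])
              ++ [pvLetterSpaced (PySem.Str.upper c)])
          = [pvLetterSpaced (PySem.Str.upper a), pvLetterSpaced (PySem.Str.upper b),
             pvLetterSpaced (PySem.Str.upper c)] from rfl]
      simp only [pvABody, List.map_cons, List.map_nil]
      rw [if_neg (by simp), if_neg (by intro hc; simp [PySem.List.len] at hc),
          if_neg (by
            intro hc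
            have := hc.1
            simp [PySem.List.len] at this),
          if_pos (⟨by simp [PySem.List.len], by
            simpa [PySem.List.pyGetD, PySem.List.pyGet?, PySem.List.pyIdx?] using hm⟩)]
      simp [PySem.List.pyGetD, PySem.List.pyGet?, PySem.List.pyIdx?]
    · rw [if_neg (by simp [hm])]
      have hau : (PySem.Str.upper a).toList ≠ [] := by
        rw [PySem.Str.toList_upper]; simp [PySem.Chars.upper, h a (by simp)]
      have hbu : (PySem.Str.upper b).toList ≠ [] := by
        rw [PySem.Str.toList_upper]; simp [PySem.Chars.upper, h b (by simp)]
      rw [show pvAppendLast ("   " ++ pvLetterSpaced (PySem.Str.upper b)) [pvLetterSpaced (PySem.Str.upper a)]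
            = [pvLetterSpaced (PySem.Str.upper a) ++ ("   " ++ pvLetterSpaced (PySem.Str.upper b))] from rfl]
      rw [show pvBGo [a, b, c] [c] 2
            [pvLetterSpaced (PySem.Str.upper a) ++ ("   " ++ pvLetterSpaced (PySem.Str.upper b))]
          = pvBGo [a, b, c] [] 3
              (if (2 == 0) || pvBreakBefore [a, b, c] 2
                then [pvLetterSpaced (PySem.Str.upper a) ++ ("   " ++ pvLetterSpaced (PySem.Str.upper b))]
                  ++ [pvLetterSpaced (PySem.Str.upper c)]
                else pvAppendLast ("   " ++ pvLetterSpaced (PySem.Str.upper c))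
                  [pvLetterSpaced (PySem.Str.upper a) ++ ("   " ++ pvLetterSpaced (PySem.Str.upper b))]) from rfl]
      rw [hbrk2]
      rw [show ((2 == 0 : Bool) || true) = true from rfl, if_pos rfl]
      rw [show pvBGo [a, b, c] [] 3
            ([pvLetterSpaced (PySem.Str.upper a) ++ ("   " ++ pvLetterSpaced (PySem.Str.upper b))]
              ++ [pvLetterSpaced (PySem.Str.upper c)])
          = [pvLetterSpaced (PySem.Str.upper a) ++ ("   " ++ pvLetterSpaced (PySem.Str.upper b)),
             pvLetterSpaced (PySem.Str.upper c)] from rfl]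
      simp only [pvABody, List.map_cons, List.map_nil]
      rw [if_neg (by simp), if_neg (by intro hc; simp [PySem.List.len] at hc),
          if_neg (by
            intro hc
            have := hc.1
            simp [PySem.List.len] at this),
          if_neg (by
            intro hc
            exact hm (by
              simpa [PySem.List.pyGetD, PySem.List.pyGet?, PySem.List.pyIdx?] using hc.2)),
          if_pos (by simp [PySem.List.len])]
      have hslice : PySem.List.slice [PySem.Str.upper a, PySem.Str.upper b, PySem.Str.upper c]
          none (some 2) = [PySem.Str.upper a, PySem.Str.upper b] := by
        simp [PySem.List.slice, PySem.List.clampIdx]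
      rw [hslice, pv_spaced_merge _ _ hau hbu]
      rw [show PySem.List.pyGetD [PySem.Str.upper a, PySem.Str.upper b, PySem.Str.upper c] 2 ""
            = PySem.Str.upper c from by
        simp [PySem.List.pyGetD, PySem.List.pyGet?, PySem.List.pyIdx?]]
      simp [pv_sappend_assoc]
  | a :: b :: c :: d :: r =>
    have hlen : PySem.List.len (a :: b :: c :: d :: r) = (r.length : Int) + 4 := by
      simp [PySem.List.len]; omega
    have hlenU : PySem.List.len ((a :: b :: c :: d :: r).map PySem.Str.upper)
        = (r.length : Int) + 4 := by
      simp [PySem.List.len]; omega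
    have hnb : ∀ i, pvBreakBefore (a :: b :: c :: d :: r) i = false := by
      intro i
      unfold pvBreakBefore
      rw [if_neg (by rw [hlen]; omega), if_neg (by rw [hlen]; omega)]
    have hA : pvABody ((a :: b :: c :: d :: r).map PySem.Str.upper)
        = [PySem.Str.join "   " (((a :: b :: c :: d :: r).map PySem.Str.upper).map pvLetterSpaced)] := by
      unfold pvABody
      rw [if_neg (by simp), if_neg (by intro hc; rw [hlenU] at hc; omega),
          if_neg (by intro hc; have := hc.1; rw [hlenU] at this; omega),
          if_neg (by intro hc; have := hc.1; rw [hlenU] at this; omega),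
          if_neg (by intro hc; rw [hlenU] at hc; omega)]
    rw [hA]
    rw [show pvBGo (a :: b :: c :: d :: r) (a :: b :: c :: d :: r) 0 []
          = pvBGo (a :: b :: c :: d :: r) (b :: c :: d :: r) 1
              ([] ++ [pvLetterSpaced (PySem.Str.upper a)]) from rfl]
    rw [pvBGo_nobreak _ hnb _ 1 [] _ (by omega)]
    have hmap : ((a :: b :: c :: d :: r).map PySem.Str.upper).map pvLetterSpaced
        = pvLetterSpaced (PySem.Str.upper a)
            :: (b :: c :: d :: r).map (fun w => pvLetterSpaced (PySem.Str.upper w)) := by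
      simp [List.map_map, Function.comp]
    rw [hmap, pv_join_tail]
    simp

lemma pv_words_nonempty (s : String) :
    ∀ w ∈ PySem.Str.split₀ s, w.toList ≠ [] := by
  intro w hw
  have hvl : w.toList ∈ PySem.Chars.split₀ s.toList := by
    rw [← PySem.Str.split₀_map_toList]
    exact List.mem_map_of_mem hw
  exact (pv_split0_nice s.toList _ hvl).1

-- ===== VERDICT (by name: the statement is the Claim_ definition above) =====
theorem title_card_lines_spec : Claim_equal_title_card_lines := by
  intro text _
  unfold Spec_title_card_lines
  cases text with
  | none => decide
  | some s =>
    unfold title_card_lines title_card_lines_alt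
    rw [pv_words_eq s]
    simp only [Option.getD_some]
    exact pv_body_eq _ (pv_words_nonempty s)
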